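-- pv_equiv track=rewrite | github.com/Dahlkar/advent-of-code | 2023/9/main.py | prev_numbers
-- ===== SOURCE A (Python) =====
-- def prev_numbers(data):
--     numbers = []
--     for sequences in data:
--         num = 0
--         for x in reversed(sequences):
--             num = x[0] - num
--         numbers.append(num)
--
--     return sum(numbers)
-- ===== SOURCE B (Python) =====
-- def prev_numbers(data):
--     total = 0
--     for sequences in data:
--         sign = 1
--         for x in sequences:
--             total += sign * x[0]
--             sign = -sign
--     return total
-- ===== Notes on version B (the rewrite author's own statement) =====
-- stated objective: simpler
-- what changed: Replaces the reversed subtraction-chain accumulator and intermediate list with a single forward pass keeping a running total and a flipping sign, adding sign*x[0] directly.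
import Mathlib
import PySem

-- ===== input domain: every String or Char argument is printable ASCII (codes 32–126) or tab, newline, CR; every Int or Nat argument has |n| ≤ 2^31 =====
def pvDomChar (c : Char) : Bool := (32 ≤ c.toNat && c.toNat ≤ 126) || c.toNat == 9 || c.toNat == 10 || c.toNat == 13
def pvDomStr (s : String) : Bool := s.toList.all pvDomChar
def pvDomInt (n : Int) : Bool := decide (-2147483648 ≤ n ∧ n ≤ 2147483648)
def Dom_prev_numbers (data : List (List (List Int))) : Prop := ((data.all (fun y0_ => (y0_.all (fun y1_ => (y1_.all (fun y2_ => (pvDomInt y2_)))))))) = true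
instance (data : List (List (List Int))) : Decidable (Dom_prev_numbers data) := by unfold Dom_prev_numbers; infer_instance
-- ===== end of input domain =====

-- B replaces A's reversed subtraction-chain and intermediate list with one forward pass
-- carrying a running total and a flipping sign (objective: simpler).

-- ===== PORT A =====
-- inner loop of A: `for x in reversed(sequences): num = x[0] - num` (x[0] raises on empty x; excluded by Pre_)
def pvAInner (sequences : List (List Int)) : Int :=
  sequences.reverse.foldl (fun num x => (PySem.List.pyGet? x 0).getD 0 - num) 0

def prev_numbers (data : List (List (List Int))) : Int :=
  (data.foldl (fun numbers sequences => numbers ++ [pvAInner sequences]) ([] : List Int)).foldl (· + ·) 0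

-- ===== PORT B =====
-- inner loop of B over state (total, sign)
def pvBStep (p : Int × Int) (x : List Int) : Int × Int :=
  (p.1 + p.2 * (PySem.List.pyGet? x 0).getD 0, -p.2)

def prev_numbers_alt (data : List (List (List Int))) : Int :=
  (data.foldl (fun total sequences => (sequences.foldl pvBStep (total, 1)).1) 0)

-- ===== PRECONDITION & SPEC =====
-- A evaluates x[0] for every inner list x, raising IndexError on an empty one; Pre_ excludes those.
def Pre_prev_numbers (data : List (List (List Int))) : Prop :=
  ∀ s ∈ data, ∀ x ∈ s, x ≠ []
instance (data : List (List (List Int))) : Decidable (Pre_prev_numbers data) := by unfold Pre_prev_numbers; infer_instance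
def pvWitness_prev_numbers : List (List (List Int)) := [[[1, 2], [3]], [[5]]]

def Spec_prev_numbers (data : List (List (List Int))) (out : Int) : Prop := out = prev_numbers_alt data
instance (data : List (List (List Int))) (out : Int) : Decidable (Spec_prev_numbers data out) := by unfold Spec_prev_numbers; infer_instance

-- ===== CLAIM (what is proved, stated in full; the proofs are below) =====
def Claim_equal_prev_numbers : Prop := ∀ (data : List (List (List Int))), Dom_prev_numbers data → Pre_prev_numbers data → Spec_prev_numbers data (prev_numbers data)

-- ===== LEMMAS AND PROOFS =====

theorem pvAInner_cons (x : List Int) (l : List (List Int)) :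
    pvAInner (x :: l) = (PySem.List.pyGet? x 0).getD 0 - pvAInner l := by
  simp [pvAInner, List.foldl_append]

theorem pvB_inner (l : List (List Int)) : ∀ (t s : Int),
    (l.foldl pvBStep (t, s)).1 = t + s * pvAInner l := by
  induction l with
  | nil => intro t s; simp [pvAInner]
  | cons x l ih =>
    intro t s
    simp only [List.foldl_cons, pvBStep, pvAInner_cons]
    rw [ih]
    ring

theorem pvSum_append (data : List (List (List Int))) : ∀ (ns : List Int),
    ((data.foldl (fun numbers sequences => numbers ++ [pvAInner sequences]) ns).foldl (· + ·) 0)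
      = ns.foldl (· + ·) 0 + data.foldl (fun total sequences => total + pvAInner sequences) 0 := by
  induction data with
  | nil => intro ns; simp
  | cons s data ih =>
    intro ns
    simp only [List.foldl_cons]
    rw [ih (ns ++ [pvAInner s]), List.foldl_append,
      PySem.List.foldl_add data pvAInner, PySem.List.foldl_add data pvAInner]
    simp
    ring

-- ===== VERDICT (by name: the statement is the Claim_ definition above) =====
theorem prev_numbers_spec : Claim_equal_prev_numbers := by
  intro data _ _
  unfold Spec_prev_numbers prev_numbers prev_numbers_alt
  rw [pvSum_append]
  have : ∀ (d : List (List (List Int))) (t : Int),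
      d.foldl (fun total sequences => (sequences.foldl pvBStep (total, 1)).1) t
        = d.foldl (fun total sequences => total + pvAInner sequences) t := by
    intro d
    induction d with
    | nil => intro t; rfl
    | cons s d ih => intro t; simp [List.foldl_cons, pvB_inner, one_mul, ih]
  simp [this]
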